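-- pv_equiv track=rewrite | github.com/taeefnajib/Vocazee | server/generate_voice.py | combine_short_chunks
-- ===== SOURCE A (Python) =====
-- def combine_short_chunks(chunks, min_length=10000, max_length=15000):
--     """Combine short audio chunks to meet the desired length requirements."""
--     combined_chunks = []
--     current_chunk = None
--
--     for chunk in chunks:
--         if current_chunk is None:
--             current_chunk = chunk
--         else:
--             if len(current_chunk) + len(chunk) <= max_length:
--                 current_chunk += chunk
--             else:
--                 if len(current_chunk) >= min_length:
--                     combined_chunks.append(current_chunk)
--                 current_chunk = chunk
--
--     if current_chunk is not None and len(current_chunk) >= min_length: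
--         combined_chunks.append(current_chunk)
--
--     return combined_chunks
-- ===== SOURCE B (Python) =====
-- def combine_short_chunks(chunks, min_length=10000, max_length=15000):
--     """Prefix-sum + binary-search rewrite: precompute cumulative lengths once,
--     then for each group start find the group end by binary search for the
--     largest endpoint whose cumulative length still fits max_length (always at
--     least one chunk), and emit the joined slice when it meets min_length."""
--     n = len(chunks)
--     prefix = [0]
--     total = 0
--     for c in chunks:
--         total += len(c)
--         prefix.append(total)
--     result = []
--     i = 0
--     while i < n:
--         lo, hi = i + 1, n
--         while lo < hi:
--             mid = (lo + hi + 1) // 2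
--             if prefix[mid] - prefix[i] <= max_length:
--                 lo = mid
--             else:
--                 hi = mid - 1
--         j = lo
--         if prefix[j] - prefix[i] >= min_length:
--             result.append("".join(chunks[i:j]))
--         i = j
--     return result
-- ===== Notes on version B (the rewrite author's own statement) =====
-- stated objective: alternative
-- what changed: B precomputes a prefix-sum array of chunk lengths and finds each group's endpoint with a binary search over it (emitting one join per group), instead of A's streaming loop that concatenates into a running string and flushes on overflow.
import Mathlib
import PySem

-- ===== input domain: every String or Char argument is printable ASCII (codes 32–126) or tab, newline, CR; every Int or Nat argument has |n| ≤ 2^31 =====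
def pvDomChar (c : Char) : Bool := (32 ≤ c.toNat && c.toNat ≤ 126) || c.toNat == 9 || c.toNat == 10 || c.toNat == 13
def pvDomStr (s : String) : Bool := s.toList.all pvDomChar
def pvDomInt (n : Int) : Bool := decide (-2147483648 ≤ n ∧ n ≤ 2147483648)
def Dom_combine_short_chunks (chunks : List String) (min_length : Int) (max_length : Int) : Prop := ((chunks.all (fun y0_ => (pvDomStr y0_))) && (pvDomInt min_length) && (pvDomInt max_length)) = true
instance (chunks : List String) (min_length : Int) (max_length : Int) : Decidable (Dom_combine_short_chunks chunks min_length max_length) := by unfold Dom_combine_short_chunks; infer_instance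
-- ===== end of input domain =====

-- B replaces A's streaming accumulator loop by a prefix-sum array plus a binary
-- search for each group's endpoint (alternative algorithm; joins each group once).

-- ===== PORT A =====
-- A's loop state: (combined_chunks, current_chunk); strings handled as List Char (String ++ / len are opaque).
def cscStepA (min_length max_length : Int) (st : List (List Char) × Option (List Char)) (chunk : String) :
    List (List Char) × Option (List Char) :=
  match st with
  | (combined, none) => (combined, some chunk.toList)
  | (combined, some cur) =>
    if (cur.length : Int) + (chunk.toList.length : Int) ≤ max_length then
      (combined, some (cur ++ chunk.toList))
    else if (cur.length : Int) ≥ min_length then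
      (combined ++ [cur], some chunk.toList)
    else
      (combined, some chunk.toList)

def combine_short_chunks (chunks : List String) (min_length : Int) (max_length : Int) : List String :=
  let st := chunks.foldl (cscStepA min_length max_length) ([], none)
  match st with
  | (combined, none) => combined.map String.ofList
  | (combined, some cur) =>
    if (cur.length : Int) ≥ min_length then (combined ++ [cur]).map String.ofList
    else combined.map String.ofList

-- ===== PORT B =====
-- prefix = [0]; total = 0; for c in chunks: total += len(c); prefix.append(total)
def cscPrefix (chunks : List String) : List Int :=
  (chunks.foldl (fun (st : List Int × Int) c =>
    let t := st.2 + PySem.Str.len c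
    (st.1 ++ [t], t)) ([0], 0)).1

-- inner while loop: binary search for the largest j in [lo, hi] with prefix[j] - prefix[i] <= max_length
-- (the while loop is ported with an explicit fuel bound (hi - lo).toNat, enough for every iteration)
def cscBSearch (pre : List Int) (pI bound : Int) : Nat → Int → Int → Int
  | 0, lo, _ => lo
  | fuel + 1, lo, hi =>
    if lo < hi then
      let mid := PySem.Int.floordiv (lo + hi + 1) 2
      if PySem.List.pyGetD pre mid 0 - pI ≤ bound then cscBSearch pre pI bound fuel mid hi
      else cscBSearch pre pI bound fuel lo (mid - 1)
    else lo

-- outer while loop: i jumps to the binary-searched j, emitting the joined slice when it fits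
-- (fuel n.toNat bounds the iterations: i advances by at least 1 each time)
def cscOuter (chunks : List String) (pre : List Int) (min_length max_length n : Int) :
    Nat → Int → List String → List String
  | 0, _, result => result
  | fuel + 1, i, result =>
    if i < n then
      let j := cscBSearch pre (PySem.List.pyGetD pre i 0) max_length (n - (i + 1)).toNat (i + 1) n
      let result' :=
        if PySem.List.pyGetD pre j 0 - PySem.List.pyGetD pre i 0 ≥ min_length then
          result ++ [PySem.Str.join "" (PySem.List.slice chunks (some i) (some j))]
        else result
      cscOuter chunks pre min_length max_length n fuel j result'
    else result

def combine_short_chunks_alt (chunks : List String) (min_length : Int) (max_length : Int) : List String :=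
  cscOuter chunks (cscPrefix chunks) min_length max_length (PySem.List.len chunks)
    (PySem.List.len chunks).toNat 0 []

-- ===== PRECONDITION & SPEC =====
def Spec_combine_short_chunks (chunks : List String) (min_length : Int) (max_length : Int) (out : List String) : Prop := out = combine_short_chunks_alt chunks min_length max_length
instance (chunks : List String) (min_length : Int) (max_length : Int) (out : List String) : Decidable (Spec_combine_short_chunks chunks min_length max_length out) := by unfold Spec_combine_short_chunks; infer_instance

-- ===== CLAIM (what is proved, stated in full; the proofs are below) =====
def Claim_equal_combine_short_chunks : Prop := ∀ (chunks : List String) (min_length : Int) (max_length : Int), Dom_combine_short_chunks chunks min_length max_length → Spec_combine_short_chunks chunks min_length max_length (combine_short_chunks chunks min_length max_length)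

-- ===== LEMMAS AND PROOFS =====
-- the characters of a group of chunks, as one list
def cscChars (g : List String) : List Char := g.flatMap String.toList

-- prefix-sum value: total length of the first k chunks
def cscP (chunks : List String) (k : Nat) : Int := ((cscChars (chunks.take k)).length : Int)

lemma csc_join_eq (g : List String) : PySem.Str.join "" g = String.ofList (cscChars g) := by
  apply String.toList_inj.mp
  simp [PySem.Str.toList_join, PySem.Chars.join, cscChars, List.intercalate]
  induction g with
  | nil => simp
  | cons x xs ih => cases xs <;> simp_all

-- A's final flush, as a function of the fold state
def cscAfin (min_length : Int) (st : List (List Char) × Option (List Char)) : List String :=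
  match st with
  | (combined, none) => combined.map String.ofList
  | (combined, some cur) =>
    if (cur.length : Int) ≥ min_length then (combined ++ [cur]).map String.ofList
    else combined.map String.ofList

-- reference greedy grouping: extend the current group while it still fits max_length
def cscExt (max_length : Int) (grp : List String) (t : Int) : List String → List String × Int × List String
  | [] => (grp, t, [])
  | c :: rest =>
    if t + (c.toList.length : Int) ≤ max_length then
      cscExt max_length (grp ++ [c]) (t + (c.toList.length : Int)) rest
    else (grp, t, c :: rest)

lemma cscExt_len (max_length : Int) (l : List String) : ∀ grp t,
    (cscExt max_length grp t l).2.2.length ≤ l.length := by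
  induction l with
  | nil => intro grp t; simp [cscExt]
  | cons c rest ih =>
    intro grp t
    simp only [cscExt]
    split
    · exact le_trans (ih _ _) (by simp)
    · simp

def cscG (min_length max_length : Int) : List String → List String
  | [] => []
  | c :: rest =>
    let e := cscExt max_length [c] ((c.toList.length : Int)) rest
    (if e.2.1 ≥ min_length then [String.ofList (cscChars e.1)] else []) ++ cscG min_length max_length e.2.2
termination_by l => l.length
decreasing_by
  have := cscExt_len max_length rest [c] ((c.toList.length : Int))
  simp only [List.length_cons]
  omega

-- ========== A equals the reference grouping ==========
lemma cscA_run (min_length max_length : Int) (l : List String) : ∀ (cur : List String) (comb : List (List Char)),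
    cur ≠ [] →
    cscAfin min_length (l.foldl (cscStepA min_length max_length) (comb, some (cscChars cur))) =
      comb.map String.ofList ++
        (let e := cscExt max_length cur (((cscChars cur).length : Int)) l
         (if e.2.1 ≥ min_length then [String.ofList (cscChars e.1)] else []) ++
           cscG min_length max_length e.2.2) := by
  intro cur comb
  induction l generalizing cur comb with
  | nil =>
    intro hcur
    simp only [List.foldl_nil, cscExt, cscG, cscAfin]
    split <;> simp
  | cons c rest ih =>
    intro hcur
    by_cases hfit : ((cscChars cur).length : Int) + (c.toList.length : Int) ≤ max_length
    · -- merge: current chunk grows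
      have hA : cscStepA min_length max_length (comb, some (cscChars cur)) c =
          (comb, some (cscChars (cur ++ [c]))) := by
        simp only [cscStepA]
        rw [if_pos hfit]
        simp only [cscChars, List.flatMap_append, List.flatMap_cons, List.flatMap_nil,
          List.append_nil]
      have hE : cscExt max_length cur ((cscChars cur).length : Int) (c :: rest) =
          cscExt max_length (cur ++ [c]) ((cscChars (cur ++ [c])).length : Int) rest := by
        simp only [cscExt]
        rw [if_pos hfit]
        congr 1
        simp only [cscChars, List.flatMap_append, List.flatMap_cons, List.flatMap_nil,
          List.append_nil, List.length_append]
        push_cast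
        ring
      rw [List.foldl_cons, hA, hE]
      exact ih (cur ++ [c]) comb (by simp)
    · -- flush: the running chunk is emitted (if long enough) and c starts fresh
      have hcc : cscChars [c] = c.toList := by simp [cscChars]
      have hA : cscStepA min_length max_length (comb, some (cscChars cur)) c =
          ((if ((cscChars cur).length : Int) ≥ min_length then comb ++ [cscChars cur] else comb),
            some (cscChars [c])) := by
        simp only [cscStepA]
        rw [if_neg hfit, hcc]
        split <;> rfl
      have hE : cscExt max_length cur ((cscChars cur).length : Int) (c :: rest) =
          (cur, ((cscChars cur).length : Int), c :: rest) := by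
        simp only [cscExt]
        rw [if_neg hfit]
      rw [List.foldl_cons, hA, hE]
      rw [ih [c] _ (by simp)]
      have hc1 : ((cscChars [c]).length : Int) = (c.toList.length : Int) := by
        simp [cscChars]
      have hG : cscG min_length max_length (c :: rest) =
          (let e := cscExt max_length [c] ((c.toList.length : Int)) rest
           (if e.2.1 ≥ min_length then [String.ofList (cscChars e.1)] else []) ++
             cscG min_length max_length e.2.2) := by
        simp only [cscG]
      rw [hc1, ← hG]
      dsimp only
      by_cases hge : ((cscChars cur).length : Int) ≥ min_length
      · rw [if_pos hge, if_pos hge]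
        simp
      · rw [if_neg hge, if_neg hge]
        simp

lemma cscA_eq_G (chunks : List String) (min_length max_length : Int) :
    combine_short_chunks chunks min_length max_length = cscG min_length max_length chunks := by
  cases chunks with
  | nil => simp [combine_short_chunks, cscG]
  | cons c rest =>
    have h0 : cscStepA min_length max_length ([], none) c = ([], some (cscChars [c])) := by
      simp [cscStepA, cscChars]
    have hbody : combine_short_chunks (c :: rest) min_length max_length =
        cscAfin min_length ((c :: rest).foldl (cscStepA min_length max_length) ([], none)) := by
      rfl
    rw [hbody, List.foldl_cons, h0, cscA_run min_length max_length rest [c] [] (by simp)]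
    have hc1 : ((cscChars [c]).length : Int) = (c.toList.length : Int) := by
      simp [cscChars]
    rw [hc1]
    simp [cscG]

-- ========== prefix characterization ==========
def cscPre' (t : Int) : List String → List Int
  | [] => []
  | c :: r => (t + PySem.Str.len c) :: cscPre' (t + PySem.Str.len c) r

lemma cscPrefix_aux (l : List String) : ∀ (pre : List Int) (t : Int),
    (l.foldl (fun (st : List Int × Int) c =>
      let t := st.2 + PySem.Str.len c
      (st.1 ++ [t], t)) (pre, t)).1 = pre ++ cscPre' t l := by
  induction l with
  | nil => intro pre t; simp [cscPre']
  | cons c r ih =>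
    intro pre t
    simp only [List.foldl_cons, cscPre']
    rw [ih]
    simp

lemma cscPrefix_eq (chunks : List String) : cscPrefix chunks = 0 :: cscPre' 0 chunks := by
  unfold cscPrefix
  rw [cscPrefix_aux]
  simp

lemma cscPre'_getD (l : List String) : ∀ (t : Int) (k : Nat), k < l.length →
    (cscPre' t l).getD k 0 = t + ((cscChars (l.take (k + 1))).length : Int) := by
  induction l with
  | nil => intro t k hk; simp at hk
  | cons c r ih =>
    intro t k hk
    cases k with
    | zero => simp [cscPre', cscChars, PySem.Str.len_eq]
    | succ k =>
      simp only [cscPre', List.getD_cons_succ]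
      rw [ih (t + PySem.Str.len c) k (by simpa using hk)]
      simp [cscChars, PySem.Str.len_eq]
      ring

lemma csc_pre_getD (chunks : List String) (k : Nat) (hk : k ≤ chunks.length) :
    (cscPrefix chunks).getD k 0 = cscP chunks k := by
  rw [cscPrefix_eq]
  cases k with
  | zero => simp [cscP, cscChars]
  | succ k =>
    simp only [List.getD_cons_succ]
    rw [cscPre'_getD chunks 0 k (by omega)]
    simp [cscP]

lemma cscP_succ (chunks : List String) (k : Nat) (h : k < chunks.length) :
    cscP chunks (k + 1) = cscP chunks k + ((chunks[k].toList.length : Int)) := by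
  unfold cscP
  have ht : chunks.take (k + 1) = chunks.take k ++ [chunks[k]] := by
    rw [List.take_add_one]
    simp [List.getElem?_eq_getElem h]
  rw [ht]
  simp only [cscChars, List.flatMap_append, List.flatMap_cons, List.flatMap_nil,
    List.append_nil, List.length_append]
  push_cast
  ring

lemma cscP_mono (chunks : List String) (a b : Nat) (hab : a ≤ b) :
    cscP chunks a ≤ cscP chunks b := by
  unfold cscP
  have h1 : chunks.take a = (chunks.take b).take a := by
    rw [List.take_take]
    congr 1
    omega
  rw [h1]
  conv_rhs => rw [← List.take_append_drop a (chunks.take b)]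
  simp only [cscChars, List.flatMap_append, List.length_append]
  omega

-- ========== binary search finds a characterized stop point ==========
lemma cscBSearch_eq (pre : List Int) (pI bound : Int) (fuel : Nat) : ∀ (lo hi s : Int),
    (hi - lo).toNat ≤ fuel → 0 ≤ lo → lo ≤ s → s ≤ hi →
    (∀ q : Int, lo < q → q ≤ s → pre.getD q.toNat 0 - pI ≤ bound) →
    (∀ q : Int, s < q → q ≤ hi → bound < pre.getD q.toNat 0 - pI) →
    cscBSearch pre pI bound fuel lo hi = s := by
  induction fuel with
  | zero =>
    intro lo hi s hfuel _ h1 h2 _ _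
    simp only [cscBSearch]
    omega
  | succ fuel ih =>
    intro lo hi s hfuel hlo h1 h2 htrue hfail
    simp only [cscBSearch]
    split
    · rename_i hlt
      have hb := PySem.Int.floordiv_two_mid_bounds (lo := lo + 1) (hi := hi) (by omega)
      have he : lo + 1 + hi = lo + hi + 1 := by ring
      rw [he] at hb
      rw [PySem.List.pyGetD_of_nonneg _ _ (by omega)]
      split
      · rename_i hcond
        have hms : PySem.Int.floordiv (lo + hi + 1) 2 ≤ s := by
          by_contra hcon
          exact absurd hcond (not_le.mpr (hfail _ (by omega) (by omega)))
        exact ih _ hi s (by omega) (by omega) hms h2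
          (fun q hq1 hq2 => htrue q (by omega) hq2) hfail
      · rename_i hcond
        have hms : s < PySem.Int.floordiv (lo + hi + 1) 2 := by
          by_contra hcon
          exact hcond (htrue _ (by omega) (by omega))
        exact ih lo _ s (by omega) hlo h1 (by omega) htrue
          (fun q hq1 hq2 => hfail q hq1 (by omega))
    · omega

-- ========== the greedy extension, in prefix-sum terms ==========
lemma cscExt_run (chunks : List String) (max_length : Int) :
    ∀ (k p i : Nat), i < p → p ≤ chunks.length → k = chunks.length - p →
    ∃ s : Nat, p ≤ s ∧ s ≤ chunks.length ∧
      cscExt max_length ((chunks.drop i).take (p - i)) (cscP chunks p - cscP chunks i) (chunks.drop p) =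
        ((chunks.drop i).take (s - i), cscP chunks s - cscP chunks i, chunks.drop s) ∧
      (∀ q : Nat, p ≤ q → q < s → cscP chunks (q + 1) - cscP chunks i ≤ max_length) ∧
      (s = chunks.length ∨ max_length < cscP chunks (s + 1) - cscP chunks i) := by
  intro k
  induction k with
  | zero =>
    intro p i hip hpn hk
    have hpn' : p = chunks.length := by omega
    subst hpn'
    refine ⟨chunks.length, le_refl _, le_refl _, ?_, by omega, Or.inl rfl⟩
    simp [cscExt, List.drop_length]
  | succ k ih =>
    intro p i hip hpn hk
    have hplt : p < chunks.length := by omega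
    have hd : chunks.drop p = chunks[p] :: chunks.drop (p + 1) :=
      List.drop_eq_getElem_cons hplt
    rw [hd]
    simp only [cscExt]
    split
    · rename_i hcond
      -- merge chunks[p] into the group and continue
      have hgrp : (chunks.drop i).take (p - i) ++ [chunks[p]] = (chunks.drop i).take (p + 1 - i) := by
        have hlen : p - i < (chunks.drop i).length := by
          rw [List.length_drop]
          omega
        have hidx : (chunks.drop i)[p - i] = chunks[p] := by
          rw [List.getElem_drop]
          congr 1
          omega
        rw [show p + 1 - i = (p - i) + 1 by omega, List.take_add_one,
          List.getElem?_eq_getElem hlen]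
        simp [hidx]
      have ht : cscP chunks p - cscP chunks i + (chunks[p].toList.length : Int) =
          cscP chunks (p + 1) - cscP chunks i := by
        rw [cscP_succ chunks p hplt]
        ring
      rw [hgrp, ht]
      obtain ⟨s, hps, hsn, hext, hmerge, hfail⟩ :=
        ih (p + 1) i (by omega) (by omega) (by omega)
      refine ⟨s, by omega, hsn, hext, ?_, hfail⟩
      intro q hq1 hq2
      rcases Nat.eq_or_lt_of_le hq1 with hq | hq
      · subst hq
        rw [← ht] at *
        omega
      · exact hmerge q (by omega) hq2
    · rename_i hcond
      -- chunks[p] does not fit: the group stops at p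
      refine ⟨p, le_refl _, by omega, ?_, by omega, Or.inr ?_⟩
      · rw [hd]
      · rw [cscP_succ chunks p hplt]
        omega

-- ========== B equals the reference grouping ==========
lemma cscB_run (chunks : List String) (min_length max_length : Int) :
    ∀ (fuel i : Nat), i ≤ chunks.length → chunks.length - i ≤ fuel → ∀ acc : List String,
    cscOuter chunks (cscPrefix chunks) min_length max_length (chunks.length : Int) fuel (i : Int) acc =
      acc ++ cscG min_length max_length (chunks.drop i) := by
  intro fuel
  induction fuel with
  | zero =>
    intro i hin hfuel acc
    have hi : i = chunks.length := by omega
    subst hi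
    simp only [cscOuter, List.drop_length, cscG, List.append_nil]
  | succ fuel ih =>
    intro i hin hfuel acc
    by_cases hcase : i < chunks.length
    · obtain ⟨s, hps, hsn, hext, hmerge, hfail⟩ :=
        cscExt_run chunks max_length (chunks.length - (i + 1)) (i + 1) i (by omega) (by omega) rfl
      have hgi : PySem.List.pyGetD (cscPrefix chunks) (i : Int) 0 = cscP chunks i := by
        rw [PySem.List.pyGetD_of_nonneg _ _ (by omega)]
        simp only [Int.toNat_natCast]
        exact csc_pre_getD chunks i (by omega)
      have hgs : PySem.List.pyGetD (cscPrefix chunks) (s : Int) 0 = cscP chunks s := by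
        rw [PySem.List.pyGetD_of_nonneg _ _ (by omega)]
        simp only [Int.toNat_natCast]
        exact csc_pre_getD chunks s hsn
      have hbs : cscBSearch (cscPrefix chunks) (cscP chunks i) max_length
          (((chunks.length : Int) - ((i : Int) + 1)).toNat) ((i : Int) + 1)
          (chunks.length : Int) = (s : Int) := by
        apply cscBSearch_eq
        · omega
        · omega
        · exact_mod_cast hps
        · exact_mod_cast hsn
        · intro q hq1 hq2
          have hq0 : 0 ≤ q := by omega
          have hqq : ((q.toNat : Int)) = q := Int.toNat_of_nonneg hq0
          have hq3 : i + 2 ≤ q.toNat := by omega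
          have hq4 : q.toNat ≤ s := by omega
          rw [csc_pre_getD chunks q.toNat (by omega)]
          have hm := hmerge (q.toNat - 1) (by omega) (by omega)
          rw [show q.toNat - 1 + 1 = q.toNat by omega] at hm
          exact hm
        · intro q hq1 hq2
          have hq0 : 0 ≤ q := by omega
          have hqq : ((q.toNat : Int)) = q := Int.toNat_of_nonneg hq0
          have hq3 : s < q.toNat := by omega
          have hq4 : q.toNat ≤ chunks.length := by omega
          rw [csc_pre_getD chunks q.toNat hq4]
          rcases hfail with hfa | hfb
          · omega
          · have hmono := cscP_mono chunks (s + 1) q.toNat (by omega)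
            omega
      have hd : chunks.drop i = chunks[i] :: chunks.drop (i + 1) :=
        List.drop_eq_getElem_cons hcase
      have htake1 : (chunks.drop i).take ((i + 1) - i) = [chunks[i]] := by
        rw [show (i + 1) - i = 1 by omega, hd]
        rfl
      have ht : cscP chunks (i + 1) - cscP chunks i = (chunks[i].toList.length : Int) := by
        rw [cscP_succ chunks i hcase]
        ring
      have hGd : cscG min_length max_length (chunks.drop i) =
          (if (cscP chunks s - cscP chunks i) ≥ min_length then
            [String.ofList (cscChars ((chunks.drop i).take (s - i)))]
          else []) ++ cscG min_length max_length (chunks.drop s) := by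
        conv_lhs => rw [hd]
        simp only [cscG]
        rw [← htake1, ← ht, hext]
      have hslice : PySem.List.slice chunks (some (i : Int)) (some (s : Int)) =
          (chunks.drop i).take (s - i) := PySem.List.slice_natCast chunks i s
      simp only [cscOuter]
      rw [if_pos (by exact_mod_cast hcase)]
      rw [hgi, hbs, hgs, hslice, hGd]
      rw [ih s hsn (by omega)]
      rw [csc_join_eq]
      by_cases hge : cscP chunks s - cscP chunks i ≥ min_length
      · rw [if_pos hge, if_pos hge]
        simp
      · rw [if_neg hge, if_neg hge]
        simp
    · simp only [cscOuter]
      rw [if_neg (by exact_mod_cast hcase)]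
      rw [List.drop_eq_nil_of_le (by omega)]
      simp [cscG]

-- ===== VERDICT (by name: the statement is the Claim_ definition above) =====
theorem combine_short_chunks_spec : Claim_equal_combine_short_chunks := by
  intro chunks min_length max_length _
  unfold Spec_combine_short_chunks
  rw [cscA_eq_G]
  unfold combine_short_chunks_alt
  rw [PySem.List.len_eq]
  have := cscB_run chunks min_length max_length chunks.length 0 (by omega) (by omega) []
  simp only [Nat.cast_zero, Int.toNat_natCast] at this ⊢
  rw [this]
  simp
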